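-- pv_equiv track=rewrite | github.com/mdiederichsen/ojibwe-cg-anon | src/dependency.py | split_cg3_sentences
-- ===== SOURCE A (Python) =====
-- def split_cg3_sentences(cg3_text: str) -> list[str]:
--     """
--     Split a CG3 cohort block into segments at sentence-final punctuation cohorts.
--     Break when a line's form is exactly "<.>", "<?>", or "<!>".
--     The punctuation line stays with the segment it ends.
--     Returns segments each ending with a single \n.
--     """
--     EOS = {".", "?", "!"} # end of sentence punctuation
--
--     segs = []
--     cur = []
--     last_was_eos = False
--
--     for ln in cg3_text.splitlines():
--         s = ln.strip()
--
--         if s.startswith("\"<") and s.endswith(">\""):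
--             if last_was_eos and cur:
--                 segs.append("\n".join(cur).rstrip() + "\n")
--                 cur = []
--                 last_was_eos = False  # reset after closing segment
--
--             cur.append(ln)
--
--             # if EOS close on the next surface cohort, so readings stay attached
--             token = s[2:-2]
--             if token in EOS:
--                 last_was_eos = True
--         else:
--             # append everything else to current block
--             cur.append(ln)
--
--     # close on end
--     if cur:
--         segs.append("\n".join(cur).rstrip() + "\n")
--
--     return segs
-- ===== SOURCE B (Python) =====
-- def split_cg3_sentences(cg3_text: str) -> list[str]:
--     lines = cg3_text.splitlines()
--     EOS = {".", "?", "!"}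
--     # pass 1: boundary indices -- a cohort line that follows an EOS cohort
--     bounds = []
--     pending = False
--     for i, ln in enumerate(lines):
--         s = ln.strip()
--         if s.startswith('"<') and s.endswith('>"'):
--             if pending:
--                 bounds.append(i)
--             pending = s[2:-2] in EOS
--     # pass 2: slice the line list at the boundaries
--     segs = []
--     prev = 0
--     for b in bounds + [len(lines)]:
--         group = lines[prev:b]
--         if group:
--             segs.append("\n".join(group).rstrip() + "\n")
--         prev = b
--     return segs
-- ===== Notes on version B (the rewrite author's own statement) =====
-- stated objective: alternative
-- what changed: A builds segments in one pass with a (segments, current-buffer, last-was-EOS) state machine; B decomposes the job into two passes: first collect the boundary indices (cohort lines following an EOS cohort), then slice the line list at those boundaries and emit each non-empty slice.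
import Mathlib
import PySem

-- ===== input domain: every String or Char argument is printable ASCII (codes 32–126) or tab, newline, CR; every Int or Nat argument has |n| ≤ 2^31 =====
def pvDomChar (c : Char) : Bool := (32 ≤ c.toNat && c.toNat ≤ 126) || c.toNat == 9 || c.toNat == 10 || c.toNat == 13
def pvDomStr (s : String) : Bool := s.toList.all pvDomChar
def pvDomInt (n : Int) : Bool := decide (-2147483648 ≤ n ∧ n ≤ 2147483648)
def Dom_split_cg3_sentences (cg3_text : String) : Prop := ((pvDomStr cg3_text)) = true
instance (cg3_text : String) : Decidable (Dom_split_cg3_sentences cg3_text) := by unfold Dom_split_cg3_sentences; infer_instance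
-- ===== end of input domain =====

-- B replaces A's single fold with triple state (segs, cur, last_was_eos) by a two-pass
-- decomposition (pass 1 collects boundary indices, pass 2 slices the line list);
-- objective: alternative decomposition, same asymptotic cost.

-- ===== PORT A =====
-- literal transliteration of A: one fold over splitlines with state (segs, cur, last_was_eos)
def split_cg3_sentences (cg3_text : String) : List String :=
  let st := (PySem.Str.splitlines cg3_text).foldl
    (fun (st : List String × List String × Bool) (ln : String) =>
      let s := PySem.Str.strip ln
      if PySem.Str.startswith s "\"<" && PySem.Str.endswith s ">\"" then
        let st1 := if st.2.2 && !st.2.1.isEmpty then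
            (st.1 ++ [PySem.Str.rstrip (PySem.Str.join "\n" st.2.1) ++ "\n"], ([] : List String), false)
          else st
        let cur := st1.2.1 ++ [ln]
        let token := PySem.Str.slice s (some 2) (some (-2))
        (st1.1, cur, if token == "." || token == "?" || token == "!" then true else st1.2.2)
      else (st.1, st.2.1 ++ [ln], st.2.2)) ([], [], false)
  if !st.2.1.isEmpty then st.1 ++ [PySem.Str.rstrip (PySem.Str.join "\n" st.2.1) ++ "\n"] else st.1

-- ===== PORT B =====
-- literal transliteration of B (Source B): pass 1 collects boundary indices, pass 2 slices lines
def split_cg3_sentences_alt (cg3_text : String) : List String :=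
  let lines := PySem.Str.splitlines cg3_text
  let p1 := (List.zipIdx lines 0).foldl
    (fun (acc : List Nat × Bool) (li : String × Nat) =>
      let s := PySem.Str.strip li.1
      if PySem.Str.startswith s "\"<" && PySem.Str.endswith s ">\"" then
        ((if acc.2 then acc.1 ++ [li.2] else acc.1),
         (PySem.Str.slice s (some 2) (some (-2)) == "." ||
          PySem.Str.slice s (some 2) (some (-2)) == "?" ||
          PySem.Str.slice s (some 2) (some (-2)) == "!"))
      else acc) ([], false)
  let p2 := (p1.1 ++ [lines.length]).foldl
    (fun (acc : List String × Nat) (b : Nat) =>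
      -- group := lines[prev:b]; exact as (lines.drop prev).take (b - prev) by PySem.List.slice_natCast
      let group := (lines.drop acc.2).take (b - acc.2)
      ((if !group.isEmpty then acc.1 ++ [PySem.Str.rstrip (PySem.Str.join "\n" group) ++ "\n"] else acc.1), b))
    ([], 0)
  p2.1

-- ===== PRECONDITION & SPEC =====
def Spec_split_cg3_sentences (cg3_text : String) (out : List String) : Prop := out = split_cg3_sentences_alt cg3_text
instance (cg3_text : String) (out : List String) : Decidable (Spec_split_cg3_sentences cg3_text out) := by unfold Spec_split_cg3_sentences; infer_instance

-- ===== CLAIM (what is proved, stated in full; the proofs are below) =====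
def Claim_equal_split_cg3_sentences : Prop := ∀ (cg3_text : String), Dom_split_cg3_sentences cg3_text → Spec_split_cg3_sentences cg3_text (split_cg3_sentences cg3_text)

-- ===== LEMMAS AND PROOFS =====

def pvCohort (ln : String) : Bool :=
  PySem.Str.startswith (PySem.Str.strip ln) "\"<" && PySem.Str.endswith (PySem.Str.strip ln) ">\""

def pvIsEos (ln : String) : Bool :=
  PySem.Str.slice (PySem.Str.strip ln) (some 2) (some (-2)) == "." ||
  PySem.Str.slice (PySem.Str.strip ln) (some 2) (some (-2)) == "?" ||
  PySem.Str.slice (PySem.Str.strip ln) (some 2) (some (-2)) == "!"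

def pvEmit (g : List String) : String := PySem.Str.rstrip (PySem.Str.join "\n" g) ++ "\n"

-- named versions of the three loop bodies (each definitionally equal to its port's lambda)
def pvStepA (st : List String × List String × Bool) (ln : String) : List String × List String × Bool :=
  let s := PySem.Str.strip ln
  if PySem.Str.startswith s "\"<" && PySem.Str.endswith s ">\"" then
    let st1 := if st.2.2 && !st.2.1.isEmpty then
        (st.1 ++ [PySem.Str.rstrip (PySem.Str.join "\n" st.2.1) ++ "\n"], ([] : List String), false)
      else st
    let cur := st1.2.1 ++ [ln]
    let token := PySem.Str.slice s (some 2) (some (-2))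
    (st1.1, cur, if token == "." || token == "?" || token == "!" then true else st1.2.2)
  else (st.1, st.2.1 ++ [ln], st.2.2)

def pvClose (st : List String × List String × Bool) : List String :=
  if !st.2.1.isEmpty then st.1 ++ [pvEmit st.2.1] else st.1

def pvStepB1 (acc : List Nat × Bool) (li : String × Nat) : List Nat × Bool :=
  let s := PySem.Str.strip li.1
  if PySem.Str.startswith s "\"<" && PySem.Str.endswith s ">\"" then
    ((if acc.2 then acc.1 ++ [li.2] else acc.1),
     (PySem.Str.slice s (some 2) (some (-2)) == "." ||
      PySem.Str.slice s (some 2) (some (-2)) == "?" ||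
      PySem.Str.slice s (some 2) (some (-2)) == "!"))
  else acc

def pvStepB2 (full : List String) (acc : List String × Nat) (b : Nat) : List String × Nat :=
  let group := (full.drop acc.2).take (b - acc.2)
  ((if !group.isEmpty then acc.1 ++ [PySem.Str.rstrip (PySem.Str.join "\n" group) ++ "\n"] else acc.1), b)

theorem pvStepA_cohort_close {segs cur : List String} {eos : Bool} {ln : String}
    (hc : pvCohort ln = true) (he : (eos && !cur.isEmpty) = true) :
    pvStepA (segs, cur, eos) ln = (segs ++ [pvEmit cur], [ln], pvIsEos ln) := by
  unfold pvStepA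
  dsimp only
  rw [show (PySem.Str.startswith (PySem.Str.strip ln) "\"<" &&
      PySem.Str.endswith (PySem.Str.strip ln) ">\"") = pvCohort ln from rfl]
  rw [show (PySem.Str.slice (PySem.Str.strip ln) (some 2) (some (-2)) == "." ||
      PySem.Str.slice (PySem.Str.strip ln) (some 2) (some (-2)) == "?" ||
      PySem.Str.slice (PySem.Str.strip ln) (some 2) (some (-2)) == "!") = pvIsEos ln from rfl]
  cases hI : pvIsEos ln <;> simp [hc, he, pvEmit]

theorem pvStepA_cohort_open {segs cur : List String} {eos : Bool} {ln : String}
    (hc : pvCohort ln = true) (he : (eos && !cur.isEmpty) = false) :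
    pvStepA (segs, cur, eos) ln = (segs, cur ++ [ln], if pvIsEos ln then true else eos) := by
  unfold pvStepA
  dsimp only
  rw [show (PySem.Str.startswith (PySem.Str.strip ln) "\"<" &&
      PySem.Str.endswith (PySem.Str.strip ln) ">\"") = pvCohort ln from rfl]
  rw [show (PySem.Str.slice (PySem.Str.strip ln) (some 2) (some (-2)) == "." ||
      PySem.Str.slice (PySem.Str.strip ln) (some 2) (some (-2)) == "?" ||
      PySem.Str.slice (PySem.Str.strip ln) (some 2) (some (-2)) == "!") = pvIsEos ln from rfl]
  cases hI : pvIsEos ln <;> simp [hc, he]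

theorem pvStepA_plain {segs cur : List String} {eos : Bool} {ln : String}
    (hc : pvCohort ln = false) :
    pvStepA (segs, cur, eos) ln = (segs, cur ++ [ln], eos) := by
  unfold pvStepA
  dsimp only
  rw [show (PySem.Str.startswith (PySem.Str.strip ln) "\"<" &&
      PySem.Str.endswith (PySem.Str.strip ln) ">\"") = pvCohort ln from rfl]
  simp [hc]

theorem pvStepB1_cohort {acc : List Nat} {pend : Bool} {ln : String} {k : Nat}
    (hc : pvCohort ln = true) :
    pvStepB1 (acc, pend) (ln, k) = ((if pend then acc ++ [k] else acc), pvIsEos ln) := by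
  unfold pvStepB1
  dsimp only
  rw [show (PySem.Str.startswith (PySem.Str.strip ln) "\"<" &&
      PySem.Str.endswith (PySem.Str.strip ln) ">\"") = pvCohort ln from rfl]
  rw [show (PySem.Str.slice (PySem.Str.strip ln) (some 2) (some (-2)) == "." ||
      PySem.Str.slice (PySem.Str.strip ln) (some 2) (some (-2)) == "?" ||
      PySem.Str.slice (PySem.Str.strip ln) (some 2) (some (-2)) == "!") = pvIsEos ln from rfl]
  simp [hc]

theorem pvStepB1_plain {acc : List Nat} {pend : Bool} {ln : String} {k : Nat}
    (hc : pvCohort ln = false) :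
    pvStepB1 (acc, pend) (ln, k) = (acc, pend) := by
  unfold pvStepB1
  dsimp only
  rw [show (PySem.Str.startswith (PySem.Str.strip ln) "\"<" &&
      PySem.Str.endswith (PySem.Str.strip ln) ">\"") = pvCohort ln from rfl]
  simp [hc]

/-- The common mid-level spec: the list of (non-empty) line groups. -/
def pvGroups : List String → List String → Bool → List (List String)
  | [], cur, _ => if cur.isEmpty then [] else [cur]
  | ln :: rest, cur, eos =>
    if pvCohort ln then
      if eos && !cur.isEmpty then cur :: pvGroups rest [ln] (pvIsEos ln)
      else pvGroups rest (cur ++ [ln]) (if pvIsEos ln then true else eos)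
    else pvGroups rest (cur ++ [ln]) eos

/-- Recursive characterisation of B's pass-1 boundary indices. -/
def pvBnds : List String → Nat → Bool → List Nat
  | [], _, _ => []
  | ln :: rest, i, pend =>
    if pvCohort ln then (if pend then [i] else []) ++ pvBnds rest (i + 1) (pvIsEos ln)
    else pvBnds rest (i + 1) pend

def pvPend : List String → Bool → Bool
  | [], p => p
  | ln :: rest, p => pvPend rest (if pvCohort ln then pvIsEos ln else p)

/-- A's fold (plus the final close) computes `pvGroups`. -/
theorem pvA_fold (lines : List String) :
    ∀ (segs cur : List String) (eos : Bool),
    pvClose (lines.foldl pvStepA (segs, cur, eos)) = segs ++ (pvGroups lines cur eos).map pvEmit := by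
  induction lines with
  | nil =>
    intro segs cur eos
    simp only [List.foldl_nil, pvGroups, pvClose]
    cases h : cur.isEmpty <;> simp [h]
  | cons ln rest ih =>
    intro segs cur eos
    rw [List.foldl_cons]
    by_cases hc : pvCohort ln = true
    · by_cases he : (eos && !cur.isEmpty) = true
      · rw [pvStepA_cohort_close hc he, ih]
        simp [pvGroups, hc, he]
      · have he' : (eos && !cur.isEmpty) = false := by simpa using he
        rw [pvStepA_cohort_open hc he', ih]
        simp [pvGroups, hc, he']
    · have hc' : pvCohort ln = false := by simpa using hc
      rw [pvStepA_plain hc', ih]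
      simp [pvGroups, hc']

/-- B's pass 1 computes `pvBnds` (and `pvPend`). -/
theorem pvB_pass1 (lines : List String) :
    ∀ (k : Nat) (acc : List Nat) (pend : Bool),
    (List.zipIdx lines k).foldl pvStepB1 (acc, pend)
      = (acc ++ pvBnds lines k pend, pvPend lines pend) := by
  induction lines with
  | nil => intro k acc pend; simp [pvBnds, pvPend]
  | cons ln rest ih =>
    intro k acc pend
    rw [List.zipIdx_cons, List.foldl_cons]
    by_cases hc : pvCohort ln = true
    · rw [pvStepB1_cohort hc, ih]
      simp only [pvBnds, pvPend, hc, ↓reduceIte]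
      cases pend <;> simp
    · have hc' : pvCohort ln = false := by simpa using hc
      rw [pvStepB1_plain hc', ih]
      simp [pvBnds, pvPend, hc']

/-- KEY: B's pass 2 over the boundaries of the remaining lines rebuilds `pvGroups`. -/
theorem pvB_pass2 (full : List String) :
    ∀ (rest : List String) (prev p0 : Nat) (eos : Bool) (segs : List String),
    full.drop prev = rest → prev ≤ full.length → p0 ≤ prev → (eos = true → p0 < prev) →
    ((pvBnds rest prev eos ++ [full.length]).foldl (pvStepB2 full) (segs, p0)).1
      = segs ++ (pvGroups rest ((full.drop p0).take (prev - p0)) eos).map pvEmit := by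
  intro rest
  induction rest with
  | nil =>
    intro prev p0 eos segs hdrop hle hp0 _
    have hprev : prev = full.length := by
      have := List.drop_eq_nil_iff.mp hdrop; omega
    have hcur : (full.drop p0).take (prev - p0) = full.drop p0 := by
      apply List.take_of_length_le; simp [hprev]
    simp only [pvBnds, List.nil_append, List.foldl_cons, List.foldl_nil, pvGroups, pvStepB2]
    rw [show full.length - p0 = prev - p0 by omega, hcur]
    cases h : (full.drop p0).isEmpty <;> simp [h, pvEmit]
  | cons ln rest' ih =>
    intro prev p0 eos segs hdrop hle hp0 heos
    have hlt : prev < full.length := by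
      by_contra h
      have : full.drop prev = [] := List.drop_eq_nil_iff.mpr (by omega)
      rw [hdrop] at this; exact List.cons_ne_nil _ _ this
    have hdrop' : full.drop (prev + 1) = rest' := by
      have h1 : full.drop (prev + 1) = (full.drop prev).drop 1 := by
        rw [List.drop_drop]
      rw [h1, hdrop]; rfl
    have hln : (full.drop p0).drop (prev - p0) = ln :: rest' := by
      rw [List.drop_drop, show p0 + (prev - p0) = prev by omega, hdrop]
    have htake : (full.drop p0).take (prev + 1 - p0) = (full.drop p0).take (prev - p0) ++ [ln] := by
      rw [show prev + 1 - p0 = (prev - p0) + 1 by omega, List.take_succ]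
      have hget : (full.drop p0)[prev - p0]? = some ln := by
        rw [List.getElem?_drop, show p0 + (prev - p0) = prev by omega, ← List.head?_drop, hdrop]
        rfl
      simp [hget]
    by_cases hc : pvCohort ln = true
    · by_cases he : eos = true
      · subst he
        have hcurlen : ((full.drop p0).take (prev - p0)).length = prev - p0 := by
          simp; omega
        have hcurne : ((full.drop p0).take (prev - p0)).isEmpty = false := by
          rw [List.isEmpty_eq_false_iff_exists_mem]
          have hpos : 0 < ((full.drop p0).take (prev - p0)).length := by
            rw [hcurlen]; have := heos rfl; omega
          exact ⟨_, List.getElem_mem hpos⟩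
        simp only [pvBnds, hc, ↓reduceIte, List.cons_append, List.nil_append, List.foldl_cons]
        have hstep : pvStepB2 full (segs, p0) prev
            = (segs ++ [pvEmit ((full.drop p0).take (prev - p0))], prev) := by
          unfold pvStepB2
          simp [hcurne, pvEmit]
        rw [hstep,
          ih (prev + 1) prev (pvIsEos ln) _ hdrop' (by omega) (by omega) (fun _ => by omega)]
        have hone : (full.drop prev).take (prev + 1 - prev) = [ln] := by
          rw [show prev + 1 - prev = 1 by omega, hdrop]; rfl
        rw [hone]
        simp [pvGroups, hc, hcurne]
      · have he' : eos = false := by simpa using he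
        subst he'
        simp only [pvBnds, hc, ↓reduceIte, Bool.false_eq_true, if_false, List.nil_append]
        rw [ih (prev + 1) p0 (pvIsEos ln) segs hdrop' (by omega) (by omega)
          (fun h => by cases hI : pvIsEos ln <;> omega), htake]
        simp only [pvGroups, hc, ↓reduceIte, Bool.and_false, Bool.false_eq_true, if_false]
        cases hI : pvIsEos ln <;> simp [hI]
    · have hc' : pvCohort ln = false := by simpa using hc
      simp only [pvBnds, hc', Bool.false_eq_true, if_false]
      rw [ih (prev + 1) p0 eos segs hdrop' (by omega) (by omega)
        (fun h => by have := heos h; omega), htake]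
      simp [pvGroups, hc']

theorem pvA_eq (t : String) :
    split_cg3_sentences t = (pvGroups (PySem.Str.splitlines t) [] false).map pvEmit := by
  show pvClose ((PySem.Str.splitlines t).foldl pvStepA ([], [], false)) = _
  rw [pvA_fold]
  simp

theorem pvB_eq (t : String) :
    split_cg3_sentences_alt t = (pvGroups (PySem.Str.splitlines t) [] false).map pvEmit := by
  show ((((List.zipIdx (PySem.Str.splitlines t) 0).foldl pvStepB1 ([], false)).1
      ++ [(PySem.Str.splitlines t).length]).foldl (pvStepB2 (PySem.Str.splitlines t)) ([], 0)).1 = _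
  rw [pvB_pass1]
  simp only [List.nil_append]
  rw [pvB_pass2 (PySem.Str.splitlines t) (PySem.Str.splitlines t) 0 0 false []
    (by simp) (by omega) (by omega) (by simp)]
  simp

-- ===== VERDICT (by name: the statement is the Claim_ definition above) =====
theorem split_cg3_sentences_spec : Claim_equal_split_cg3_sentences := by
  intro t _
  unfold Spec_split_cg3_sentences
  rw [pvA_eq, pvB_eq]
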